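-- pv_equiv track=rewrite | github.com/shihsyun/codility_lessons | Lesson06/number_of_disc_intersections.py | solution
-- ===== SOURCE A (Python) =====
-- def solution(A):
--
--     # write your code in Python 3.6
--     # 先建立圓盤陣列，接著循序計算左右各端點的X軸座標，接著依照(1)座標(2)L/R的參數做正向排序
--     # 此時圓盤陣列會如下圖所示
--     # http://www.lucainvernizzi.net/img/blog/disk-intersections-thick-642f9e5c.png
--     # 依序讀取圓盤陣列，若遇左端點就遞增盤子數量並加入intersections變數中
--     # 反之就遞減盤子數量，最後即可求出各圓交集數量
--     # more detail please check it out at https://www.martinkysel.com/codility-number-of-disc-intersections-2010-beta-solution/ .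
--
--     circles = []
--     for idx , radius in enumerate(A):
--         circles.append([idx - radius , 'L'])
--         circles.append([idx + radius , 'R'])
--
--     circles.sort(key = lambda x :(x[0],x[1]))
--
--     intersections = 0
--     actives = 0
--
--     for _, flag in circles:
--         if flag == 'L':
--             intersections += actives
--             actives += 1
--         else:
--             actives -= 1
--
--         if intersections > 10e6:
--             return -1
--
--     return intersections
-- ===== SOURCE B (Python) =====
-- def solution(A):
--     # Pair-counting instead of an event sweep: two discs intersect unless one
--     # ends strictly before the other begins, so
--     #   intersections = C(n,2) - #(ordered pairs (i,j) with right_i < left_j),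
--     # computed with two sorted endpoint arrays and one linear merge pass.
--     n = len(A)
--     lefts = sorted(i - r for i, r in enumerate(A))
--     rights = sorted(i + r for i, r in enumerate(A))
--     crossing = 0
--     k = 0
--     for lv in lefts:
--         while k < n and rights[k] < lv:
--             k += 1
--         crossing += k
--     total = n * (n - 1) // 2 - crossing
--     if total > 10e6:
--         return -1
--     return total
-- ===== Notes on version B (the rewrite author's own statement) =====
-- stated objective: faster
-- what changed: Instead of labelling 2n endpoints, sorting them with a (coordinate, 'L'/'R') tuple key and sweeping with an active-disc counter, B counts non-overlapping pairs directly: it sorts the left endpoints and the right endpoints separately as plain ints and merges them with one two-pointer pass, returning C(n,2) minus the number of pairs whose right end lies strictly before a left end (same 10^7 early-out value).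
import Mathlib
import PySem

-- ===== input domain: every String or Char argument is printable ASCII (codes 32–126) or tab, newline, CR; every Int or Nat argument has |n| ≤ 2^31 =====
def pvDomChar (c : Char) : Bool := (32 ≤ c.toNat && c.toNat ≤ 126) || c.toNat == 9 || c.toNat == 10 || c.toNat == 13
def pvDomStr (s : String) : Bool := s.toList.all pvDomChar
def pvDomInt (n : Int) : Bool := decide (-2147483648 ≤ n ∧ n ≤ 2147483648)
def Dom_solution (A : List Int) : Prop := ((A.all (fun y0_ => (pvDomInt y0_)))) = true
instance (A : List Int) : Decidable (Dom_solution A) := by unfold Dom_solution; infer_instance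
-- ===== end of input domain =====

-- B replaces A's labelled-endpoint sort-and-sweep by pair counting over two sorted int
-- endpoint arrays merged in one two-pointer pass (same values; measurably faster constants).

-- ===== PORT A =====
-- A's scan over the sorted [coordinate, flag] list; `intersections > 10e6` compares an int
-- with the float 1.0e7, which is exactly `intersections > 10000000` for an int.
def pvLoopA : List (Int × String) → Int → Int → Int
  | [], inters, _ => inters
  | (_, flag) :: rest, inters, actives =>
    let p := if flag == "L" then (inters + actives, actives + 1) else (inters, actives - 1)
    if p.1 > 10000000 then -1 else pvLoopA rest p.1 p.2

def solution (A : List Int) : Int :=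
  let circles := (PySem.List.enumerate A).foldl
    (fun acc p => (acc ++ [(p.1 - p.2, "L")]) ++ [(p.1 + p.2, "R")]) []
  let circles := PySem.List.sorted2 circles (fun x => x.1) (fun x => x.2)
  pvLoopA circles 0 0

-- ===== PORT B =====
-- `while k < n and rights[k] < lv: k += 1` (the guard makes rights[k] in range)
def pvAdv (rights : List Int) (lv : Int) (k : Nat) : Nat :=
  if h : k < rights.length then
    if rights[k] < lv then pvAdv rights lv (k + 1) else k
  else k
termination_by rights.length - k

def solution_alt (A : List Int) : Int :=
  let n := A.length
  let lefts := PySem.List.sorted ((PySem.List.enumerate A).map (fun p => p.1 - p.2)) (fun x => x)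
  let rights := PySem.List.sorted ((PySem.List.enumerate A).map (fun p => p.1 + p.2)) (fun x => x)
  let ck := lefts.foldl (fun (s : Int × Nat) lv =>
      let k := pvAdv rights lv s.2
      (s.1 + (k : Int), k)) ((0 : Int), (0 : Nat))
  let total := PySem.Int.floordiv ((n : Int) * ((n : Int) - 1)) 2 - ck.1
  if total > 10000000 then -1 else total

-- ===== PRECONDITION & SPEC =====
-- Pre_ admits every list of genuine (non-negative) radii, and every list of at most 4472
-- entries whatever their sign (so it admits all ordinarily sized inputs).  It excludes only
-- inputs that combine MORE than 4472 discs with a negative entry (not a radius): only there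
-- can A's mid-scan `> 10e6` early-exit fire transiently while the final count is back
-- below 10^7, a scan-order artefact B's direct pair count cannot see.
def Pre_solution (A : List Int) : Prop := (∀ r ∈ A, 0 ≤ r) ∨ A.length ≤ 4472
instance (A : List Int) : Decidable (Pre_solution A) := by unfold Pre_solution; infer_instance
def pvWitness_solution : List Int := [1, 5, 2, 1, 4, 0]
def Spec_solution (A : List Int) (out : Int) : Prop := out = solution_alt A
instance (A : List Int) (out : Int) : Decidable (Spec_solution A out) := by unfold Spec_solution; infer_instance

-- ===== CLAIM (what is proved, stated in full; the proofs are below) =====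
def Claim_equal_solution : Prop := ∀ (A : List Int), Dom_solution A → Pre_solution A → Spec_solution A (solution A)

-- ===== LEMMAS AND PROOFS =====

-- abbreviations for the proofs
def pvIsL (e : Int × String) : Bool := e.2 == "L"
def pvK (e : Int × String) : Int ×ₗ String := toLex (e.1, e.2)
def pvCL (es : List (Int × String)) : Int := (es.countP pvIsL : Int)
def pvCR (es : List (Int × String)) : Int := (es.countP (fun e => !pvIsL e) : Int)
-- number of (earlier L, later L) position pairs / (earlier R, later L) position pairs
def pvLL : List (Int × String) → Int
  | [] => 0
  | e :: r => (if pvIsL e then pvCL r else 0) + pvLL r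
def pvRL : List (Int × String) → Int
  | [] => 0
  | e :: r => (if pvIsL e then 0 else pvCL r) + pvRL r
-- the uncapped sweep sum and the "some prefix exceeded 10^7" flag of A's loop
def pvSweep : List (Int × String) → Int → Int
  | [], _ => 0
  | e :: r, a => if pvIsL e then a + pvSweep r (a + 1) else pvSweep r (a - 1)
def pvCapped : List (Int × String) → Int → Int → Bool
  | [], _, _ => false
  | e :: r, i, a =>
    let p := if pvIsL e then (i + a, a + 1) else (i, a - 1)
    p.1 > 10000000 || pvCapped r p.1 p.2
-- #{(r,l) ∈ rs × ls : r < l}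
def pvCross (rs ls : List Int) : Int := (ls.map (fun l => (rs.countP (fun x => x < l) : Int))).sum
-- the raw event list A builds, and its per-disc form
def pvBuild (A : List Int) : List (Int × String) :=
  (PySem.List.enumerate A).foldl (fun acc p => (acc ++ [(p.1 - p.2, "L")]) ++ [(p.1 + p.2, "R")]) []
def pvEvts (p : Int × Int) : List (Int × String) := [(p.1 - p.2, "L"), (p.1 + p.2, "R")]
-- running actives of A's sweep never drop below 0 from `a` on
def pvAOK (es : List (Int × String)) (a : Int) : Prop :=
  ∀ u v, es = u ++ v → 0 ≤ a + pvCL u - pvCR u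

lemma pvLoopA_eq (es : List (Int × String)) : ∀ i a,
    pvLoopA es i a = if pvCapped es i a then -1 else i + pvSweep es a := by
  induction es with
  | nil => intro i a; simp [pvLoopA, pvCapped, pvSweep]
  | cons e r ih =>
    intro i a
    obtain ⟨c, f⟩ := e
    by_cases hf : (f == "L") = true
    · simp only [pvLoopA, pvCapped, pvSweep, pvIsL, hf, if_true]
      by_cases hcap : i + a > 10000000
      · simp [hcap]
      · rw [if_neg hcap, ih]
        simp only [decide_eq_false hcap, Bool.false_or]
        split_ifs <;> ring
    · have hf' : (f == "L") = false := by simpa using hf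
      simp only [pvLoopA, pvCapped, pvSweep, pvIsL, hf', Bool.false_eq_true, if_false]
      by_cases hcap : i > 10000000
      · simp [hcap]
      · rw [if_neg hcap, ih]
        simp only [decide_eq_false hcap, Bool.false_or]


lemma pvSweep_eq (es : List (Int × String)) : ∀ a,
    pvSweep es a = a * pvCL es + pvLL es - pvRL es := by
  induction es with
  | nil => intro a; simp [pvSweep, pvCL, pvLL, pvRL]
  | cons e r ih =>
    intro a
    by_cases h : pvIsL e = true
    · simp only [pvSweep, pvLL, pvRL, pvCL, List.countP_cons, h, if_true]
      rw [ih]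
      simp only [pvCL]
      push_cast
      ring
    · have h' : pvIsL e = false := by simpa using h
      simp only [pvSweep, pvLL, pvRL, pvCL, List.countP_cons, h', Bool.false_eq_true, if_false,
        zero_add, add_zero]
      rw [ih]
      simp only [pvCL]
      push_cast
      ring


lemma pvLL_double (es : List (Int × String)) : 2 * pvLL es = pvCL es * (pvCL es - 1) := by
  induction es with
  | nil => simp [pvLL, pvCL]
  | cons e r ih =>
    by_cases h : pvIsL e = true
    · simp only [pvLL, pvCL, List.countP_cons, h, if_true]
      simp only [pvCL] at ih
      push_cast
      linear_combination ih
    · have h' : pvIsL e = false := by simpa using h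
      simp only [pvLL, pvCL, List.countP_cons, h', Bool.false_eq_true, if_false, zero_add, add_zero]
      simp only [pvCL] at ih
      push_cast
      linear_combination ih


lemma pvRL_nonneg (es : List (Int × String)) : 0 ≤ pvRL es := by
  induction es with
  | nil => simp [pvRL]
  | cons e r ih =>
    simp only [pvRL]
    have h0 : (0:Int) ≤ pvCL r := Int.natCast_nonneg _
    split <;> omega


lemma pvLL_nonneg (es : List (Int × String)) : 0 ≤ pvLL es := by
  induction es with
  | nil => simp [pvLL]
  | cons e r ih =>
    simp only [pvLL]
    have h0 : (0:Int) ≤ pvCL r := Int.natCast_nonneg _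
    split <;> omega


lemma pvLL_prefix (u v : List (Int × String)) : pvLL u ≤ pvLL (u ++ v) := by
  induction u with
  | nil => simpa [pvLL] using pvLL_nonneg v
  | cons e u ih =>
    simp only [List.cons_append, pvLL]
    have h1 : pvCL u ≤ pvCL (u ++ v) := by
      simp only [pvCL, List.countP_append]
      exact_mod_cast Nat.le_add_right _ _
    split <;> omega


lemma pvK_le_iff (a b : Int × String) :
    pvK a ≤ pvK b ↔ a.1 < b.1 ∨ (a.1 = b.1 ∧ a.2 ≤ b.2) := by
  simp [pvK, Prod.Lex.le_iff]


lemma pvK_inj {a b : Int × String} (h : pvK a = pvK b) : a = b := by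
  have h' : ((a.1, a.2) : Int × String) = (b.1, b.2) := by
    have := congrArg ofLex h
    simpa [pvK] using this
  obtain ⟨h1, h2⟩ := Prod.mk.injEq .. ▸ h'
  · exact Prod.ext h1 h2


lemma pvLR_strings : ("L" : String) < "R" := by
  simp
  decide


-- the sorted event list, rewritten as a sort by the single lexicographic key pvK
lemma pv_sorted2_eq (xs : List (Int × String)) :
    PySem.List.sorted2 xs (fun x => x.1) (fun x => x.2) = PySem.List.sorted xs pvK := by
  have hb : (fun (a b : Int × String) =>
      decide (a.1 < b.1) || (!decide (b.1 < a.1) && decide (a.2 < b.2))) =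
      (fun (a b : Int × String) => decide (pvK a < pvK b)) := by
    funext a b
    rcases lt_trichotomy a.1 b.1 with h | h | h
    · simp [pvK, Prod.Lex.lt_iff, h, asymm h]
    · simp [pvK, Prod.Lex.lt_iff, h, lt_irrefl]
    · simp [pvK, Prod.Lex.lt_iff, h, asymm h, (ne_of_gt h)]
  simp only [PySem.List.sorted2, PySem.List.sorted, Bool.false_eq_true, if_false]
  rw [hb]


lemma pvBuild_eq_flatMap (A : List Int) :
    pvBuild A = (PySem.List.enumerate A).flatMap pvEvts := by
  have H : ∀ (l : List (Int × Int)) (acc : List (Int × String)),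
      l.foldl (fun acc p => (acc ++ [(p.1 - p.2, "L")]) ++ [(p.1 + p.2, "R")]) acc =
        acc ++ l.flatMap pvEvts := by
    intro l
    induction l with
    | nil => intro acc; simp
    | cons p t ih =>
      intro acc
      simp only [List.foldl_cons, List.flatMap_cons, ih]
      simp [pvEvts, List.append_assoc]
  simpa [pvBuild] using H (PySem.List.enumerate A) []


lemma pvFlags_build (A : List Int) : ∀ e ∈ pvBuild A, e.2 = "L" ∨ e.2 = "R" := by
  rw [pvBuild_eq_flatMap]
  intro e he
  rw [List.mem_flatMap] at he
  obtain ⟨p, _, hp⟩ := he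
  simp only [pvEvts, List.mem_cons, List.not_mem_nil, or_false] at hp
  rcases hp with h | h
  · left; rw [h]
  · right; rw [h]


lemma pvCross_cons_left (x : Int) (rs ls : List Int) :
    pvCross (x :: rs) ls = (ls.countP (fun l => x < l) : Int) + pvCross rs ls := by
  induction ls with
  | nil => simp [pvCross]
  | cons l t ih =>
    simp only [pvCross, List.map_cons, List.sum_cons, List.countP_cons] at ih ⊢
    by_cases h : x < l
    · simp only [h, decide_true, if_true]
      omega
    · simp only [h, decide_false, if_false]
      omega

-- characterisation of pvRL over a key-sorted list
lemma pvRL_char (es : List (Int × String)) (hflags : ∀ e ∈ es, e.2 = "L" ∨ e.2 = "R")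
    (hsort : es.Pairwise (fun a b => pvK a ≤ pvK b)) :
    pvRL es = pvCross ((es.filter (fun e => !pvIsL e)).map (·.1)) ((es.filter pvIsL).map (·.1)) := by
  induction es with
  | nil => simp [pvRL, pvCross]
  | cons e r ih =>
    have hflags' : ∀ b ∈ r, b.2 = "L" ∨ b.2 = "R" := fun b hb => hflags b (List.mem_cons_of_mem _ hb)
    rw [List.pairwise_cons] at hsort
    obtain ⟨he, hr⟩ := hsort
    by_cases hL : pvIsL e = true
    · have hfR : (e :: r).filter (fun x => !pvIsL x) = r.filter (fun x => !pvIsL x) := by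
        simp [List.filter_cons, hL]
      have hfL : (e :: r).filter pvIsL = e :: r.filter pvIsL := by
        simp [List.filter_cons, hL]
      rw [hfR, hfL, List.map_cons]
      have hz : (((r.filter (fun x => !pvIsL x)).map (fun x => x.1)).countP (fun x => x < e.1)) = 0 := by
        rw [List.countP_eq_zero]
        intro x hx
        simp only [List.mem_map, List.mem_filter] at hx
        obtain ⟨b, ⟨hbr, _⟩, rfl⟩ := hx
        have hble := he b hbr
        rw [pvK_le_iff] at hble
        simp only [decide_eq_true_eq, not_lt]
        rcases hble with h | ⟨h1, _⟩ <;> omega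
      have hstep : pvCross ((r.filter (fun x => !pvIsL x)).map (fun x => x.1))
          (e.1 :: (r.filter pvIsL).map (fun x => x.1)) =
          pvCross ((r.filter (fun x => !pvIsL x)).map (fun x => x.1))
            ((r.filter pvIsL).map (fun x => x.1)) := by
        simp only [pvCross, List.map_cons, List.sum_cons, hz]
        simp
      rw [hstep, ← ih hflags' hr]
      simp [pvRL, hL]
    · have h' : pvIsL e = false := by simpa using hL
      have hfR : (e :: r).filter (fun x => !pvIsL x) = e :: r.filter (fun x => !pvIsL x) := by
        simp [List.filter_cons, h']
      have hfL : (e :: r).filter pvIsL = r.filter pvIsL := by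
        simp [List.filter_cons, h']
      rw [hfR, hfL, List.map_cons]
      have heR : e.2 = "R" := by
        rcases hflags e List.mem_cons_self with h | h
        · exfalso; rw [pvIsL, h] at h'; simp at h'
        · exact h
      have hcount : pvCL r = (((r.filter pvIsL).map (fun x => x.1)).countP (fun l => e.1 < l) : Int) := by
        have hall : ∀ x ∈ (r.filter pvIsL).map (fun x => x.1), (fun l => decide (e.1 < l)) x = true := by
          intro x hx
          simp only [List.mem_map, List.mem_filter] at hx
          obtain ⟨b, ⟨hbr, hbf⟩, rfl⟩ := hx
          have hbL : b.2 = "L" := by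
            rcases hflags' b hbr with h | h
            · exact h
            · exfalso; rw [pvIsL, h] at hbf; simp at hbf
          have hble := he b hbr
          rw [pvK_le_iff] at hble
          simp only [decide_eq_true_eq]
          rcases hble with h | ⟨h1, h2⟩
          · exact h
          · exfalso; rw [heR, hbL] at h2; exact absurd h2 (not_le.mpr pvLR_strings)
        have hlen := List.countP_eq_length.mpr hall
        rw [hlen, List.length_map]
        simp only [pvCL]
        rw [List.countP_eq_length_filter]
      rw [pvCross_cons_left, ← hcount, ← ih hflags' hr]
      simp [pvRL, h']


lemma pvCL_build (A : List Int) : pvCL (pvBuild A) = (A.length : Int) := by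
  rw [pvBuild_eq_flatMap]
  simp only [pvCL, List.countP_flatMap]
  have h1 : ∀ p : Int × Int, (List.countP pvIsL ∘ pvEvts) p = 1 := by
    intro p
    simp [pvEvts, pvIsL, List.countP_cons]
  have h2 : ((PySem.List.enumerate A).map (List.countP pvIsL ∘ pvEvts)).sum =
      (PySem.List.enumerate A).length := by
    rw [List.map_congr_left (fun p _ => h1 p)]
    simp
  rw [h2]
  simp [PySem.List.length_enumerate]


lemma pvCoords_build_R (A : List Int) :
    ((pvBuild A).filter (fun e => !pvIsL e)).map (·.1) = (PySem.List.enumerate A).map (fun p => p.1 + p.2) := by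
  rw [pvBuild_eq_flatMap]
  induction PySem.List.enumerate A with
  | nil => simp
  | cons p t ih =>
    simp only [List.flatMap_cons, List.filter_append, List.map_append, List.map_cons, ih]
    have : (pvEvts p).filter (fun e => !pvIsL e) = [(p.1 + p.2, "R")] := by
      simp [pvEvts, pvIsL, List.filter_cons, show (("L":String) == "L") = true by decide,
        show (("R":String) == "L") = false by decide]
    rw [this]
    simp


lemma pvCoords_build_L (A : List Int) :
    ((pvBuild A).filter pvIsL).map (·.1) = (PySem.List.enumerate A).map (fun p => p.1 - p.2) := by
  rw [pvBuild_eq_flatMap]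
  induction PySem.List.enumerate A with
  | nil => simp
  | cons p t ih =>
    simp only [List.flatMap_cons, List.filter_append, List.map_append, List.map_cons, ih]
    have : (pvEvts p).filter pvIsL = [(p.1 - p.2, "L")] := by
      simp [pvEvts, pvIsL, List.filter_cons, show (("L":String) == "L") = true by decide,
        show (("R":String) == "L") = false by decide]
    rw [this]
    simp


lemma pvCross_perm {rs rs' ls ls' : List Int} (h1 : rs.Perm rs') (h2 : ls.Perm ls') :
    pvCross rs ls = pvCross rs' ls' := by
  unfold pvCross
  have hmap : ls.map (fun l => ((rs.countP (fun x => x < l) : Nat) : Int)) =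
      ls.map (fun l => ((rs'.countP (fun x => x < l) : Nat) : Int)) := by
    apply List.map_congr_left
    intro l _
    rw [h1.countP_eq]
  rw [hmap]
  exact (h2.map _).sum_eq


-- B's two-pointer: index characterisations on a sorted list
lemma pvSorted_lt_count {xs : List Int} (hs : xs.Pairwise (· ≤ ·)) {k : Nat} (hk : k < xs.length)
    {lv : Int} (h : xs[k] < lv) : k < xs.countP (fun x => x < lv) := by
  induction xs generalizing k with
  | nil => simp at hk
  | cons x t ih =>
    rw [List.pairwise_cons] at hs
    obtain ⟨hx, ht⟩ := hs
    cases k with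
    | zero =>
      simp only [List.getElem_cons_zero] at h
      rw [List.countP_cons]
      simp [h]
    | succ k =>
      simp only [List.getElem_cons_succ] at h
      have hk' : k < t.length := by simpa using hk
      have h1 := ih ht hk' h
      have hxlv : x < lv := lt_of_le_of_lt (hx _ (t.getElem_mem hk')) h
      rw [List.countP_cons]
      simp only [hxlv, decide_true, if_true]
      omega


lemma pvSorted_ge_count {xs : List Int} (hs : xs.Pairwise (· ≤ ·)) {k : Nat} (hk : k < xs.length)
    {lv : Int} (h : lv ≤ xs[k]) : xs.countP (fun x => x < lv) ≤ k := by
  induction xs generalizing k with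
  | nil => simp at hk
  | cons x t ih =>
    rw [List.pairwise_cons] at hs
    obtain ⟨hx, ht⟩ := hs
    cases k with
    | zero =>
      simp only [List.getElem_cons_zero] at h
      have hz : (x :: t).countP (fun y => y < lv) = 0 := by
        rw [List.countP_eq_zero]
        intro y hy
        rcases List.mem_cons.mp hy with rfl | hy'
        · simp only [decide_eq_true_eq]; omega
        · have := hx y hy'
          simp only [decide_eq_true_eq]; omega
      omega
    | succ k =>
      simp only [List.getElem_cons_succ] at h
      have hk' : k < t.length := by simpa using hk
      have h1 := ih ht hk' h
      rw [List.countP_cons]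
      split <;> omega


lemma pvAdv_eq {rights : List Int} (hs : rights.Pairwise (· ≤ ·)) (lv : Int) :
    ∀ k, k ≤ rights.countP (fun x => x < lv) → pvAdv rights lv k = rights.countP (fun x => x < lv) := by
  have H : ∀ m k, rights.length - k ≤ m → k ≤ rights.countP (fun x => x < lv) →
      pvAdv rights lv k = rights.countP (fun x => x < lv) := by
    intro m
    induction m with
    | zero =>
      intro k hm hk
      have hc : rights.countP (fun x => x < lv) ≤ rights.length := List.countP_le_length
      unfold pvAdv
      rw [dif_neg (by omega)]
      omega
    | succ m ih =>
      intro k hm hk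
      unfold pvAdv
      by_cases hlt : k < rights.length
      · rw [dif_pos hlt]
        by_cases hx : rights[k] < lv
        · rw [if_pos hx]
          have := pvSorted_lt_count hs hlt hx
          exact ih (k + 1) (by omega) (by omega)
        · rw [if_neg hx]
          have := pvSorted_ge_count hs hlt (not_lt.mp hx)
          omega
      · rw [dif_neg hlt]
        have hc : rights.countP (fun x => x < lv) ≤ rights.length := List.countP_le_length
        omega
  intro k hk
  exact H rights.length k (by omega) hk


lemma pvFold_eq {rights : List Int} (hs : rights.Pairwise (· ≤ ·)) :
    ∀ (ls : List Int), ls.Pairwise (· ≤ ·) → ∀ (s : Int) (k : Nat),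
      (∀ l ∈ ls, k ≤ rights.countP (fun x => x < l)) →
      (ls.foldl (fun (s : Int × Nat) lv =>
        let k := pvAdv rights lv s.2
        (s.1 + (k : Int), k)) (s, k)).1 = s + pvCross rights ls := by
  intro ls
  induction ls with
  | nil => intro _ s k _; simp [pvCross]
  | cons l t ih =>
    intro hp s k hk
    rw [List.pairwise_cons] at hp
    obtain ⟨hl, ht⟩ := hp
    simp only [List.foldl_cons]
    rw [pvAdv_eq hs l k (hk l List.mem_cons_self)]
    rw [ih ht _ _ (fun l' hl' => List.countP_mono_left
      (fun x _ hx => by simp only [decide_eq_true_eq] at hx ⊢; exact lt_of_lt_of_le hx (hl l' hl')))]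
    simp only [pvCross, List.map_cons, List.sum_cons]
    ring


-- the capped flag: false when every prefix stays ≤ 10^7
lemma pvCapped_false (es : List (Int × String)) : ∀ i a,
    (∀ u e v, es = u ++ e :: v → i + pvSweep (u ++ [e]) a ≤ 10000000) →
    pvCapped es i a = false := by
  induction es with
  | nil => intro i a _; simp [pvCapped]
  | cons e r ih =>
    intro i a h
    have h0 : i + pvSweep [e] a ≤ 10000000 := h [] e r rfl
    by_cases hL : pvIsL e = true
    · simp only [pvSweep, hL, if_true] at h0
      simp only [pvCapped, hL, if_true]
      rw [Bool.or_eq_false_iff]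
      refine ⟨by simp only [decide_eq_false_iff_not, not_lt]; omega, ?_⟩
      apply ih
      intro u e' v hsplit
      have h2 := h (e :: u) e' v (by rw [hsplit]; rfl)
      simp only [List.cons_append, pvSweep, hL, if_true] at h2
      omega
    · have h' : pvIsL e = false := by simpa using hL
      simp only [pvSweep, h', Bool.false_eq_true, if_false] at h0
      simp only [pvCapped, h', Bool.false_eq_true, if_false]
      rw [Bool.or_eq_false_iff]
      refine ⟨by simp only [decide_eq_false_iff_not, not_lt]; omega, ?_⟩
      apply ih
      intro u e' v hsplit
      have h2 := h (e :: u) e' v (by rw [hsplit]; rfl)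
      simp only [List.cons_append, pvSweep, h', Bool.false_eq_true, if_false] at h2
      omega


-- with non-negative running actives the cap fires iff the final value exceeds 10^7
lemma pvAOK_tail {e : Int × String} {r : List (Int × String)} {a : Int} (h : pvAOK (e :: r) a) :
    pvAOK r (if pvIsL e then a + 1 else a - 1) := by
  intro u v huv
  have h2 := h (e :: u) v (by simp [huv])
  simp only [pvCL, pvCR, List.countP_cons] at h2 ⊢
  by_cases hL : pvIsL e = true
  · simp only [hL, Bool.not_true, if_true, Bool.false_eq_true, if_false] at h2 ⊢
    push_cast at h2 ⊢
    omega
  · have h' : pvIsL e = false := by simpa using hL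
    simp only [h', hL, Bool.not_false, if_true, Bool.false_eq_true, if_false] at h2 ⊢
    push_cast at h2 ⊢
    omega


lemma pvSweep_nonneg (es : List (Int × String)) : ∀ a, pvAOK es a → 0 ≤ pvSweep es a := by
  induction es with
  | nil => intro a _; simp [pvSweep]
  | cons e r ih =>
    intro a h
    have ha : 0 ≤ a := by simpa [pvCL, pvCR] using h [] (e :: r) rfl
    have h' := pvAOK_tail h
    by_cases hL : pvIsL e = true
    · simp only [pvSweep, hL, if_true]
      have := ih (a + 1) (by simpa [hL] using h')
      omega
    · have h2 : pvIsL e = false := by simpa using hL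
      simp only [pvSweep, h2, Bool.false_eq_true, if_false]
      exact ih (a - 1) (by simpa [h2] using h')


lemma pvCapped_iff (es : List (Int × String)) : ∀ i a, pvAOK es a →
    (pvCapped es i a = true ↔ (es ≠ [] ∧ i + pvSweep es a > 10000000)) := by
  induction es with
  | nil => intro i a _; simp [pvCapped]
  | cons e r ih =>
    intro i a h
    have h' := pvAOK_tail h
    by_cases hL : pvIsL e = true
    · have hs : 0 ≤ pvSweep r (a + 1) := pvSweep_nonneg r (a + 1) (by simpa [hL] using h')
      simp only [pvCapped, pvSweep, hL, if_true]
      by_cases hc : i + a > 10000000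
      · simp only [hc, decide_true, Bool.true_or, true_iff]
        exact ⟨List.cons_ne_nil _ _, by omega⟩
      · simp only [decide_eq_false hc, Bool.false_or]
        rw [ih _ _ (by simpa [hL] using h')]
        by_cases hr : r = []
        · subst hr
          simp only [pvSweep, ne_eq, not_true_eq_false, false_and, iff_false, List.cons_ne_nil,
            not_true_eq_false, true_and, not_false_eq_true]
          simp
          omega
        · constructor
          · rintro ⟨_, hgt⟩
            exact ⟨List.cons_ne_nil _ _, by omega⟩
          · rintro ⟨_, hgt⟩
            exact ⟨hr, by omega⟩
    · have h2 : pvIsL e = false := by simpa using hL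
      have hs : 0 ≤ pvSweep r (a - 1) := pvSweep_nonneg r (a - 1) (by simpa [h2] using h')
      simp only [pvCapped, pvSweep, h2, Bool.false_eq_true, if_false]
      by_cases hc : i > 10000000
      · simp only [hc, decide_true, Bool.true_or, true_iff]
        exact ⟨List.cons_ne_nil _ _, by omega⟩
      · simp only [decide_eq_false hc, Bool.false_or]
        rw [ih _ _ (by simpa [h2] using h')]
        by_cases hr : r = []
        · subst hr
          simp only [pvSweep, ne_eq, List.cons_ne_nil, not_false_eq_true, true_and]
          simp
          omega
        · constructor
          · rintro ⟨_, hgt⟩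
            exact ⟨List.cons_ne_nil _ _, by omega⟩
          · rintro ⟨_, hgt⟩
            exact ⟨hr, by omega⟩


-- prefix counting: in the sorted event list of non-negative radii, R events never outnumber L events
lemma pvPrefix_core (es P v : List (Int × String)) (hsplit : es = P ++ v) (W : (Int × String) → Bool)
    (w1 : ∀ b ∈ P, ¬ pvIsL b → W b) (w2 : ∀ b ∈ v, pvIsL b → ¬ W b)
    (w3 : es.countP (fun b => !pvIsL b && W b) ≤ es.countP (fun b => pvIsL b && W b)) :
    P.countP (fun e => !pvIsL e) ≤ P.countP pvIsL := by
  have e1 : P.countP (fun e => !pvIsL e) = P.countP (fun b => !pvIsL b && W b) := by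
    apply List.countP_congr
    intro b hb
    by_cases hL : pvIsL b = true
    · simp [hL]
    · simp [hL, w1 b hb (by simp [hL])]
  have e2 : P.countP (fun b => !pvIsL b && W b) ≤ es.countP (fun b => !pvIsL b && W b) := by
    rw [hsplit]
    exact (List.sublist_append_left P v).countP_le
  have e4 : es.countP (fun b => pvIsL b && W b) = P.countP (fun b => pvIsL b && W b) := by
    rw [hsplit, List.countP_append]
    have : v.countP (fun b => pvIsL b && W b) = 0 := by
      rw [List.countP_eq_zero]
      intro b hb
      simp only [Bool.and_eq_true, not_and]
      intro h1 h2
      exact w2 b hb h1 h2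
    omega
  have e5 : P.countP (fun b => pvIsL b && W b) ≤ P.countP pvIsL := by
    apply List.countP_mono_left
    intro b _ hb
    exact (Bool.and_eq_true _ _ ▸ hb).1
  omega


lemma pvMS (A : List Int) (hA : ∀ r ∈ A, 0 ≤ r) (W : (Int × String) → Bool)
    (hW : ∀ b b', pvK b ≤ pvK b' → W b' → W b) (es : List (Int × String)) (hperm : es.Perm (pvBuild A)) :
    es.countP (fun b => !pvIsL b && W b) ≤ es.countP (fun b => pvIsL b && W b) := by
  rw [hperm.countP_eq, hperm.countP_eq, pvBuild_eq_flatMap, List.countP_flatMap,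
    List.countP_flatMap]
  apply List.sum_le_sum
  intro q hq
  have hq2 : 0 ≤ q.2 := by
    rw [PySem.List.mem_enumerate_iff] at hq
    obtain ⟨k, hkl, rfl⟩ := hq
    exact hA _ (List.getElem_mem hkl)
  have hKey : pvK (q.1 - q.2, "L") ≤ pvK (q.1 + q.2, "R") := by
    rw [pvK_le_iff]
    rcases lt_or_eq_of_le hq2 with h0 | h0
    · left; simp; omega
    · right; constructor
      · simp; omega
      · exact le_of_lt pvLR_strings
  have himp := hW _ _ hKey
  simp only [Function.comp_apply, pvEvts, List.countP_cons, List.countP_nil, pvIsL,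
    show (("L":String) == "L") = true by decide, show (("R":String) == "L") = false by decide,
    Bool.not_true, Bool.not_false, Bool.false_and, Bool.true_and]
  by_cases hWR : W (q.1 + q.2, "R") = true
  · simp [hWR, himp hWR]
  · have h2 : W (q.1 + q.2, "R") = false := by simpa using hWR
    simp only [h2, Bool.false_eq_true, if_false]
    split <;> omega


lemma pvAOK_sorted (A : List Int) (hA : ∀ r ∈ A, 0 ≤ r) (es : List (Int × String))
    (hperm : es.Perm (pvBuild A)) (hsort : es.Pairwise (fun a b => pvK a ≤ pvK b)) :
    pvAOK es 0 := by
  intro u v hsplit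
  suffices h : u.countP (fun e => !pvIsL e) ≤ u.countP pvIsL by
    simp only [pvCL, pvCR]
    omega
  rcases List.eq_nil_or_concat' u with rfl | ⟨u', e, rfl⟩
  · simp
  · have hsub : (u' ++ [e]).Sublist es := hsplit ▸ (u' ++ [e]).sublist_append_left v
    have hsu : (u' ++ [e]).Pairwise (fun a b => pvK a ≤ pvK b) := hsort.sublist hsub
    have hmem_e : e ∈ es := hsub.mem (by simp)
    have hcross : ∀ x ∈ u' ++ [e], ∀ y ∈ v, pvK x ≤ pvK y :=
      fun x hx y hy => (List.pairwise_append.mp (hsplit ▸ hsort)).2.2 x hx y hy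
    have hin : ∀ b ∈ u' ++ [e], pvK b ≤ pvK e := by
      intro b hb
      rcases List.mem_append.mp hb with hb' | hb'
      · exact (List.pairwise_append.mp hsu).2.2 b hb' e (by simp)
      · rw [List.mem_singleton.mp hb']
    set W : (Int × String) → Bool :=
      fun b => if pvIsL e = true then decide (pvK b < pvK e) else decide (pvK b ≤ pvK e) with hWdef
    apply pvPrefix_core es (u' ++ [e]) v hsplit W
    · intro b hb hbR
      have hble := hin b hb
      by_cases hLe : pvIsL e = true
      · have hne : pvK b ≠ pvK e := by
          intro hkeq
          have := pvK_inj hkeq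
          rw [this] at hbR
          exact hbR hLe
        simp [hWdef, hLe, lt_of_le_of_ne hble hne]
      · simp [hWdef, hLe, hble]
    · intro b hb hbL
      have heb := hcross e (by simp) b hb
      by_cases hLe : pvIsL e = true
      · simp [hWdef, hLe, not_lt.mpr heb]
      · simp only [hWdef, hLe, if_false, Bool.false_eq_true, decide_eq_true_eq]
        intro hle
        have hkeq : pvK b = pvK e := le_antisymm hle heb
        have := pvK_inj hkeq
        rw [this] at hbL
        exact hLe hbL
    · apply pvMS A hA W _ es hperm
      intro b b' hbb hWb'
      by_cases hLe : pvIsL e = true <;> simp only [hWdef, hLe, if_true, if_false,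
        Bool.false_eq_true, decide_eq_true_eq] at hWb' ⊢
      · exact lt_of_le_of_lt hbb hWb'
      · exact le_trans hbb hWb'


-- ===== VERDICT (by name: the statement is the Claim_ definition above) =====
theorem solution_spec : Claim_equal_solution := by
  unfold Claim_equal_solution
  intro A _hdom hpre
  unfold Spec_solution
  have hbuild : (PySem.List.enumerate A).foldl
      (fun acc p => (acc ++ [(p.1 - p.2, "L")]) ++ [(p.1 + p.2, "R")])
      ([] : List (Int × String)) = pvBuild A := rfl
  simp only [solution, solution_alt]
  rw [hbuild, pv_sorted2_eq]
  set es := PySem.List.sorted (pvBuild A) pvK with hes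
  have hperm : es.Perm (pvBuild A) := PySem.List.sorted_perm _ _ _
  have hsort : es.Pairwise (fun a b => pvK a ≤ pvK b) := PySem.List.sorted_pairwise _ _
  have hflags : ∀ e ∈ es, e.2 = "L" ∨ e.2 = "R" := fun e he => pvFlags_build A e (hperm.subset he)
  rw [pvLoopA_eq, pvSweep_eq]
  set rawL := (PySem.List.enumerate A).map (fun p => p.1 - p.2) with hrawL
  set rawR := (PySem.List.enumerate A).map (fun p => p.1 + p.2) with hrawR
  set sl := PySem.List.sorted rawL (fun x => x) with hsl
  set sr := PySem.List.sorted rawR (fun x => x) with hsr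
  have hsrP : sr.Pairwise (· ≤ ·) := by
    simpa using PySem.List.sorted_pairwise rawR (fun x => x)
  have hslP : sl.Pairwise (· ≤ ·) := by
    simpa using PySem.List.sorted_pairwise rawL (fun x => x)
  have hfold := pvFold_eq hsrP sl hslP 0 0 (fun _ _ => Nat.zero_le _)
  rw [hfold, zero_add]
  have hcross : pvCross sr sl = pvRL es := by
    rw [pvRL_char es hflags hsort]
    have hR : ((es.filter (fun e => !pvIsL e)).map (·.1)).Perm rawR := by
      rw [hrawR, ← pvCoords_build_R A]
      exact (hperm.filter _).map _
    have hL2 : ((es.filter pvIsL).map (·.1)).Perm rawL := by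
      rw [hrawL, ← pvCoords_build_L A]
      exact (hperm.filter _).map _
    have hsrp : sr.Perm rawR := PySem.List.sorted_perm _ _ _
    have hslp : sl.Perm rawL := PySem.List.sorted_perm _ _ _
    exact pvCross_perm (hsrp.trans hR.symm) (hslp.trans hL2.symm)
  have hcL : pvCL es = (A.length : Int) := by
    have h1 := pvCL_build A
    simp only [pvCL] at h1 ⊢
    rw [hperm.countP_eq]
    exact h1
  have hfd : PySem.Int.floordiv ((A.length : Int) * ((A.length : Int) - 1)) 2 = pvLL es := by
    have h2 : (A.length : Int) * ((A.length : Int) - 1) = 2 * pvLL es := by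
      rw [pvLL_double, hcL]
    rw [h2, PySem.Int.floordiv_eq_ediv_of_pos (by norm_num)]
    exact Int.mul_ediv_cancel_left _ (by norm_num)
  rw [hfd, hcross]
  simp only [zero_mul, zero_add]
  set F := pvLL es - pvRL es with hF
  rcases hpre with hA | hn
  · have haok : pvAOK es 0 := pvAOK_sorted A hA es hperm hsort
    have hiff := pvCapped_iff es 0 0 haok
    rw [pvSweep_eq] at hiff
    simp only [zero_mul, zero_add, ← hF] at hiff
    by_cases hnil : es = []
    · have hF0 : F = 0 := by rw [hF, hnil]; simp [pvLL, pvRL]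
      rw [hnil]
      simp [pvCapped, hF0]
    · by_cases hgt : F > 10000000
      · rw [if_pos (hiff.mpr ⟨hnil, by omega⟩), if_pos hgt]
      · have hcap : ¬ (pvCapped es 0 0 = true) := fun hc => by
          have := (hiff.mp hc).2
          omega
        rw [if_neg hcap, if_neg hgt]
  · have hb2 : 2 * pvLL es ≤ 19994312 := by
      rw [pvLL_double, hcL]
      have h1 : (A.length : Int) ≤ 4472 := by exact_mod_cast hn
      nlinarith [Int.natCast_nonneg A.length]
    have hFle : F ≤ 10000000 := by
      have := pvRL_nonneg es
      rw [hF]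
      omega
    have hcap : pvCapped es 0 0 = false := by
      apply pvCapped_false
      intro u e v hsplit2
      rw [pvSweep_eq]
      have hpre2 : pvLL (u ++ [e]) ≤ pvLL es := by
        have h3 : es = (u ++ [e]) ++ v := by rw [hsplit2]; simp
        rw [h3]
        exact pvLL_prefix _ _
      have h4 := pvRL_nonneg (u ++ [e])
      simp only [zero_mul, zero_add]
      omega
    simp only [hcap, Bool.false_eq_true, if_false]
    rw [if_neg (by omega : ¬ F > 10000000)]
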